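-- pv_equiv track=rewrite | github.com/karl21-02/ora-automation | src/ora_automation_api/service.py | _normalize_stages
-- ===== SOURCE A (Python) =====
-- def _normalize_stages(stages: list[str]) -> list[str]:
--     raw = [str(stage).strip().lower() for stage in stages if str(stage).strip()]
--     if not raw:
--         return ["analysis", "deliberation", "execution"]
--     normalized: list[str] = []
--     for stage in raw:
--         if stage not in normalized:
--             normalized.append(stage)
--     if "execution" not in normalized:
--         normalized.append("execution")
--     return normalized
-- ===== SOURCE B (Python) =====
-- def _normalize_stages(stages: list[str]) -> list[str]:
--     raw = [str(stage).strip().lower() for stage in stages if str(stage).strip()]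
--     if not raw:
--         return ["analysis", "deliberation", "execution"]
--     # Selection-style dedup: repeatedly take the front element and delete all of
--     # its later copies from the still-pending list; "execution" is appended to the
--     # data first, so a trailing duplicate disappears on its own and no membership
--     # test against the output is ever made.
--     pending = raw + ["execution"]
--     out: list[str] = []
--     while pending:
--         head = pending[0]
--         out.append(head)
--         pending = [x for x in pending[1:] if x != head]
--     return out
-- ===== Notes on version B (the rewrite author's own statement) =====
-- stated objective: alternative
-- what changed: The accumulator dedup loop with membership tests and the separate ensure-'execution' branch are replaced by a selection-style pass: 'execution' is appended to the data first, then the list is consumed by repeatedly emitting its front element and filtering all later copies out of the pending remainder, so no membership test against the output exists.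
import Mathlib
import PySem

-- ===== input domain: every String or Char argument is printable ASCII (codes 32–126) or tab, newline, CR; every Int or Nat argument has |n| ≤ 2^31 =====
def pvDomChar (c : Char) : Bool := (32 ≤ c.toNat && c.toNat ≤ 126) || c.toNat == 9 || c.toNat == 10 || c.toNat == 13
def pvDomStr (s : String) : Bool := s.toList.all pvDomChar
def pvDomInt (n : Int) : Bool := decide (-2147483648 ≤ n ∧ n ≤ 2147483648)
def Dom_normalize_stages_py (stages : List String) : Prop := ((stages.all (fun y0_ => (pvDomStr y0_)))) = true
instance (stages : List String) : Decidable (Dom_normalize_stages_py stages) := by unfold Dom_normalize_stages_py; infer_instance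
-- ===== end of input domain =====

-- B replaces A's membership-test dedup loop and its separate ensure-'execution' branch by a
-- selection pass (emit the front, filter its copies from the pending rest) over the data with
-- "execution" appended — an alternative decomposition with the same values everywhere.


-- ===== PORT A =====
def normalize_stages_py (stages : List String) : List String :=
  let raw := (stages.filter (fun stage => PySem.Str.strip stage ≠ "")).map
    (fun stage => PySem.Str.lower (PySem.Str.strip stage))
  if raw = [] then ["analysis", "deliberation", "execution"]
  else
    let normalized := raw.foldl
      (fun normalized stage => if stage ∉ normalized then normalized ++ [stage] else normalized) []
    if "execution" ∉ normalized then normalized ++ ["execution"] else normalized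

-- ===== PORT B =====
-- the while loop of Source B: emit the front of `pending`, drop its later copies, repeat
def pvSelect (pending : List String) (out : List String) : List String :=
  match pending with
  | [] => out
  | head :: rest => pvSelect (rest.filter (fun x => x ≠ head)) (out ++ [head])
termination_by pending.length
decreasing_by
  simp only [List.length_unattach]
  exact Nat.lt_succ_of_le (le_trans (List.length_filter_le _ _) (Nat.le_of_eq List.length_attach))

def normalize_stages_py_alt (stages : List String) : List String :=
  let raw := (stages.filter (fun stage => PySem.Str.strip stage ≠ "")).map
    (fun stage => PySem.Str.lower (PySem.Str.strip stage))
  if raw = [] then ["analysis", "deliberation", "execution"]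
  else pvSelect (raw ++ ["execution"]) []

-- ===== PRECONDITION & SPEC =====
def Spec_normalize_stages_py (stages : List String) (out : List String) : Prop := out = normalize_stages_py_alt stages
instance (stages : List String) (out : List String) : Decidable (Spec_normalize_stages_py stages out) := by unfold Spec_normalize_stages_py; infer_instance

-- ===== CLAIM (what is proved, stated in full; the proofs are below) =====
def Claim_equal_normalize_stages_py : Prop := ∀ (stages : List String), Dom_normalize_stages_py stages → Spec_normalize_stages_py stages (normalize_stages_py stages)

-- ===== LEMMAS AND PROOFS =====

-- accumulator-free form of B's selection pass, used only in the proofs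
def pvUniq : List String → List String
  | [] => []
  | head :: rest => head :: pvUniq (rest.filter (fun x => x ≠ head))
termination_by xs => xs.length
decreasing_by
  simp only [List.length_unattach]
  exact Nat.lt_succ_of_le (le_trans (List.length_filter_le _ _) (Nat.le_of_eq List.length_attach))

theorem pvUniq_nil : pvUniq [] = [] := by simp [pvUniq]

theorem pvUniq_cons (head : String) (rest : List String) :
    pvUniq (head :: rest) = head :: pvUniq (rest.filter (fun x => x ≠ head)) := by
  rw [pvUniq]

theorem mem_pvUniq_aux (n : Nat) : ∀ (xs : List String), xs.length ≤ n →
    ∀ e : String, (e ∈ pvUniq xs ↔ e ∈ xs) := by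
  induction n with
  | zero => intro xs h e; rw [List.length_eq_zero_iff.mp (Nat.le_zero.mp h)]; simp [pvUniq_nil]
  | succ n ih =>
    intro xs h e
    cases xs with
    | nil => simp [pvUniq_nil]
    | cons head rest =>
      have hlen : (rest.filter (fun x => x ≠ head)).length ≤ n :=
        le_trans (List.length_filter_le _ _) (Nat.le_of_succ_le_succ h)
      rw [pvUniq_cons]
      by_cases he : e = head
      · simp [he]
      · simp only [List.mem_cons, he, false_or]
        rw [ih _ hlen]
        simp [he]

theorem mem_pvUniq (e : String) (xs : List String) : e ∈ pvUniq xs ↔ e ∈ xs :=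
  mem_pvUniq_aux xs.length xs le_rfl e

theorem pvSelect_cons (head : String) (rest o : List String) :
    pvSelect (head :: rest) o = pvSelect (rest.filter (fun x => x ≠ head)) (o ++ [head]) := by
  rw [pvSelect]

-- B's accumulating loop computes its accumulator followed by pvUniq of the pending list
theorem pvSelect_eq_aux (n : Nat) : ∀ (p : List String), p.length ≤ n →
    ∀ o : List String, pvSelect p o = o ++ pvUniq p := by
  induction n with
  | zero =>
    intro p h o
    rw [List.length_eq_zero_iff.mp (Nat.le_zero.mp h)]
    simp [pvSelect, pvUniq_nil]
  | succ n ih =>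
    intro p h o
    cases p with
    | nil => simp [pvSelect, pvUniq_nil]
    | cons head rest =>
      have hlen : (rest.filter (fun x => x ≠ head)).length ≤ n :=
        le_trans (List.length_filter_le _ _) (Nat.le_of_succ_le_succ h)
      rw [pvSelect_cons, ih _ hlen, pvUniq_cons]
      simp

-- A's membership-accumulator loop computes pvUniq of the elements not yet in the accumulator
theorem pv_fold_eq_uniq (xs : List String) : ∀ acc : List String,
    xs.foldl (fun normalized stage => if stage ∉ normalized then normalized ++ [stage] else normalized) acc
      = acc ++ pvUniq (xs.filter (fun y => y ∉ acc)) := by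
  induction xs with
  | nil => intro acc; simp [pvUniq_nil]
  | cons x xs ih =>
    intro acc
    by_cases h : x ∈ acc
    · rw [List.foldl_cons, if_neg (not_not_intro h), ih]
      congr 2
      simp [h]
    · rw [List.foldl_cons, if_pos h, ih]
      have hfc : (x :: xs).filter (fun y => y ∉ acc) = x :: xs.filter (fun y => y ∉ acc) := by
        simp [h]
      have hff : xs.filter (fun y => y ∉ acc ++ [x]) = (xs.filter (fun y => y ∉ acc)).filter (fun a => a ≠ x) := by
        rw [List.filter_filter]
        apply List.filter_congr
        intro y _
        by_cases hy : y = x <;> by_cases hm : y ∈ acc <;> simp [hy, hm, h]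
      rw [hfc, pvUniq_cons, hff]
      simp

-- appending a single element before deduping = deduping, then appending it if it is new
theorem pvUniq_append_single_aux (n : Nat) : ∀ (xs : List String), xs.length ≤ n → ∀ e : String,
    pvUniq (xs ++ [e]) = if e ∈ xs then pvUniq xs else pvUniq xs ++ [e] := by
  induction n with
  | zero =>
    intro xs h e
    rw [List.length_eq_zero_iff.mp (Nat.le_zero.mp h)]
    simp [pvUniq_cons, pvUniq_nil]
  | succ n ih =>
    intro xs h e
    cases xs with
    | nil => simp [pvUniq_cons, pvUniq_nil]
    | cons head rest =>
      have hlen : (rest.filter (fun x => x ≠ head)).length ≤ n :=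
        le_trans (List.length_filter_le _ _) (Nat.le_of_succ_le_succ h)
      rw [List.cons_append, pvUniq_cons, List.filter_append, pvUniq_cons]
      by_cases he : e = head
      · simp [he]
      · have hsingle : ([e].filter (fun x => x ≠ head)) = [e] := by simp [he]
        rw [hsingle, ih _ hlen]
        have hmem : (e ∈ rest.filter (fun x => x ≠ head)) ↔ e ∈ rest := by simp [he]
        by_cases her : e ∈ rest
        · simp [her, he]
        · simp only [hmem, her]
          simp [her, he]

-- ===== VERDICT =====
theorem normalize_stages_py_spec : Claim_equal_normalize_stages_py := by
  intro stages _
  unfold Spec_normalize_stages_py normalize_stages_py normalize_stages_py_alt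
  set raw := (stages.filter (fun stage => PySem.Str.strip stage ≠ "")).map
    (fun stage => PySem.Str.lower (PySem.Str.strip stage)) with hraw
  by_cases h : raw = []
  · simp [h]
  · simp only [if_neg h]
    rw [pv_fold_eq_uniq, pvSelect_eq_aux (raw ++ ["execution"]).length _ le_rfl,
      pvUniq_append_single_aux raw.length _ le_rfl]
    have hfilt : raw.filter (fun y => y ∉ ([] : List String)) = raw := by simp
    rw [hfilt]
    by_cases hx : "execution" ∈ raw
    · simp [hx, mem_pvUniq]
    · simp [hx, mem_pvUniq]
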